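-- pv_equiv track=rewrite | github.com/zhouchanghai/problem_ans | codility/2015Argon.py | solution
-- ===== SOURCE A (Python) =====
-- def solution(A):
--     n = len(A)
--     left = leader0Size(A)
--     right = leader0Size([1-x for x in reversed(A)])
--     right.reverse()
--     result = 0
--     for i in range(n-1):
--         sizeL = left[i]
--         sizeR = right[i+1]
--         if sizeL > 0 and sizeR > 0:
--             result = max(result, sizeL + sizeR)
--     return result
--
-- def leader0Size(a):
--     # replace 0 with -1
--     # sumPos[i] is the first position that sum(a[0 ... pos]) == i
--     # if i < j then sumPos[i] < sumPos[j]
--     n = len(a)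
--     sumPos = [None] * (n+2)
--     sumPos[0] = -1
--     result = [0]*n
--     s = 0
--     for i, x in enumerate(a):
--         if x == 1:
--             s += 1
--             if s >= 0 and sumPos[s] is None:
--                 sumPos[s] = i
--         else:
--             s -= 1
--         if s < 0:
--             result[i] = i+1
--         elif sumPos[s+1] is not None:
--             result[i] = i - sumPos[s+1]
--     return result
-- ===== SOURCE B (Python) =====
-- def solution(A):
--     n = len(A)
--     # One forward pass: two prefix walks (s: +1 on x==1 else -1; t: +1 on x==0 else -1),
--     # a first-occurrence dict for s-values and a last-occurrence dict for t-values.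
--     s = 0
--     t = [0] * (n + 1)
--     firstOcc = {0: -1}
--     lastOcc = {0: 0}
--     svals = [0] * n
--     for i, x in enumerate(A):
--         s += 1 if x == 1 else -1
--         if s not in firstOcc:
--             firstOcc[s] = i
--         svals[i] = s
--         t[i + 1] = t[i] + (1 if x == 0 else -1)
--         lastOcc[t[i + 1]] = i + 1
--     result = 0
--     for i in range(n - 1):
--         si = svals[i]
--         if si < 0:
--             sizeL = i + 1
--         else:
--             p = firstOcc.get(si + 1, i)
--             sizeL = i - p if p < i else 0
--         j = i + 1
--         if t[n] < t[j]:
--             sizeR = n - j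
--         else:
--             k = lastOcc.get(t[j] - 1, j)
--             sizeR = k - j if k > j else 0
--         if sizeL > 0 and sizeR > 0:
--             result = max(result, sizeL + sizeR)
--     return result
-- ===== Notes on version B (the rewrite author's own statement) =====
-- stated objective: alternative
-- what changed: B replaces A's two leader0Size passes (the second over a reversed complemented copy, each maintaining an incremental first-occurrence array queried inside the loop) by ONE forward scan that records prefix-walk statistics (first-occurrence dict of the ones-walk, last-occurrence dict of the zeros-walk, prefix arrays), from which both segment lengths at every split point are then read off by closed formulas with a global-occurrence guard.
import Mathlib
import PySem

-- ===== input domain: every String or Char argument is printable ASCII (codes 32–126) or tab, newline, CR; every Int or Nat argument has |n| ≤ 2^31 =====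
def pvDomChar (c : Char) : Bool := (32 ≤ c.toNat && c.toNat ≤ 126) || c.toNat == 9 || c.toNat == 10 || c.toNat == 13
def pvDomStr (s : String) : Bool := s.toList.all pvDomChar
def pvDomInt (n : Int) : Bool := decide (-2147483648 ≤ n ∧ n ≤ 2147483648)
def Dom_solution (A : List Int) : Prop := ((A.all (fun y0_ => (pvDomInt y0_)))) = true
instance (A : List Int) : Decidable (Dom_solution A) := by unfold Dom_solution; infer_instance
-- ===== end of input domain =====

-- B replaces A's two incremental leader0Size passes by one forward scan recording prefix-walk
-- occurrence dicts, from which both segment lengths are read off by closed formulas (objective: alternative).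

-- ===== PORT A =====
-- sumPos is read/written only at indices that are provably in range (writes are guarded by 0 ≤ s,
-- and s ≤ i+1 ≤ len always holds), so List.getD/List.set are exact here; Python's `result`, a
-- preallocated zero list written once per index i in order, is ported as appending the value
-- chosen at iteration i (0 when neither branch fires).
def leaderLoop (rest : List Int) (i : Int) (sumPos : List (Option Int)) (s : Int)
    (acc : List Int) : List Int :=
  match rest with
  | [] => acc
  | x :: xs =>
    let st : List (Option Int) × Int :=
      if x = 1 then
        let s' := s + 1
        if 0 ≤ s' ∧ sumPos.getD s'.toNat none = none then (sumPos.set s'.toNat (some i), s')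
        else (sumPos, s')
      else (sumPos, s - 1)
    let r : Int :=
      if st.2 < 0 then i + 1
      else
        match st.1.getD (st.2 + 1).toNat none with
        | some p => i - p
        | none => 0
    leaderLoop xs (i + 1) st.1 st.2 (acc ++ [r])

def leader0Size (a : List Int) : List Int :=
  leaderLoop a 0 ((List.replicate (a.length + 2) (none : Option Int)).set 0 (some (-1))) 0 []

def solution (A : List Int) : Int :=
  let n := A.length
  let left := leader0Size A
  let right := (leader0Size (A.reverse.map (fun x => 1 - x))).reverse
  (List.range (n - 1)).foldl
    (fun result i =>
      let sizeL := left.getD i 0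
      let sizeR := right.getD (i + 1) 0
      if sizeL > 0 ∧ sizeR > 0 then max result (sizeL + sizeR) else result) 0

-- ===== PORT B =====
-- one forward pass of Source B building svals, firstOcc, t, lastOcc; Source B's preallocated svals and t
-- (each written once per index, in order) are ported as appends; all other reads are in range so
-- List.getD is exact.
def altScan (rest : List Int) (i : Int) (s : Int) (firstOcc : PySem.Dict Int Int)
    (svals : List Int) (tcur : Int) (t : List Int) (lastOcc : PySem.Dict Int Int) :
    List Int × PySem.Dict Int Int × List Int × PySem.Dict Int Int :=
  match rest with
  | [] => (svals, firstOcc, t, lastOcc)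
  | x :: xs =>
    let s' := s + (if x = 1 then 1 else -1)
    let firstOcc' := if firstOcc.contains s' then firstOcc else firstOcc.insert s' i
    let t' := tcur + (if x = 0 then 1 else -1)
    altScan xs (i + 1) s' firstOcc' (svals ++ [s']) t' (t ++ [t']) (lastOcc.insert t' (i + 1))

def solution_alt (A : List Int) : Int :=
  let n := A.length
  let scan := altScan A 0 0 (PySem.Dict.ofList [((0 : Int), (-1 : Int))]) [] 0 [(0 : Int)]
      (PySem.Dict.ofList [((0 : Int), (0 : Int))])
  let svals := scan.1
  let firstOcc := scan.2.1
  let t := scan.2.2.1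
  let lastOcc := scan.2.2.2
  (List.range (n - 1)).foldl
    (fun result i =>
      let si := svals.getD i 0
      let sizeL : Int :=
        if si < 0 then (i : Int) + 1
        else
          let p := firstOcc.getD (si + 1) (i : Int)
          if p < (i : Int) then (i : Int) - p else 0
      let j := i + 1
      let sizeR : Int :=
        if t.getD n 0 < t.getD j 0 then (n : Int) - (j : Int)
        else
          let k := lastOcc.getD (t.getD j 0 - 1) (j : Int)
          if k > (j : Int) then k - (j : Int) else 0
      if sizeL > 0 ∧ sizeR > 0 then max result (sizeL + sizeR) else result) 0

-- ===== PRECONDITION & SPEC =====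
def Spec_solution (A : List Int) (out : Int) : Prop := out = solution_alt A
instance (A : List Int) (out : Int) : Decidable (Spec_solution A out) := by
  unfold Spec_solution; infer_instance

-- ===== CLAIM (what is proved, stated in full; the proofs are below) =====
def Claim_equal_solution : Prop := ∀ (A : List Int), Dom_solution A → Spec_solution A (solution A)

-- ===== LEMMAS AND PROOFS =====
set_option maxHeartbeats 1000000

-- prefix walks: pvS is the ones-walk (+1 on x=1 else -1), pvT the zeros-walk (+1 on x=0 else -1)
def pvStep1 (x : Int) : Int := if x = 1 then 1 else -1
def pvStep0 (x : Int) : Int := if x = 0 then 1 else -1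
def pvS (a : List Int) (k : Nat) : Int := ((a.take k).map pvStep1).sum
def pvT (a : List Int) (k : Nat) : Int := ((a.take k).map pvStep0).sum
-- first j in [0,k] with pvS a j = v (j = 0 is the Python seed index -1)
def pvFP (a : List Int) (v : Int) (k : Nat) : Option Nat :=
  (List.range (k + 1)).find? (fun j => pvS a j = v)
-- last j in [0,k] with pvT a j = w
def pvGP (a : List Int) (w : Int) (k : Nat) : Option Nat :=
  ((List.range (k + 1)).reverse).find? (fun j => pvT a j = w)
-- the two occurrence maps as Python-index integers
def pvFPI (a : List Int) (v : Int) (k : Nat) : Option Int :=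
  (pvFP a v k).map (fun (j : Nat) => (j : Int) - 1)
def pvGPI (a : List Int) (w : Int) (k : Nat) : Option Int :=
  (pvGP a w k).map (fun (j : Nat) => (j : Int))
-- the value leader0Size a puts at index i
def pvLsp (a : List Int) (i : Nat) : Int :=
  let s := pvS a (i + 1)
  if s < 0 then (i : Int) + 1
  else
    match pvFP a (s + 1) (i + 1) with
    | some j => (i : Int) - ((j : Int) - 1)
    | none => 0
-- the model of A's sumPos array after k elements
def pvPM (a : List Int) (k : Nat) : List (Option Int) :=
  (List.range (a.length + 2)).map
    (fun (v : Nat) => if v = 0 then some (-1) else pvFPI a (v : Int) k)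

theorem pvS_succ (a : List Int) (k : Nat) (h : k < a.length) :
    pvS a (k + 1) = pvS a k + pvStep1 a[k] := by
  unfold pvS
  rw [List.take_add_one, List.getElem?_eq_getElem h]
  simp only [Option.toList_some, List.map_append, List.sum_append, List.map_cons, List.map_nil,
    List.sum_cons, List.sum_nil]
  ring

theorem pvT_succ (a : List Int) (k : Nat) (h : k < a.length) :
    pvT a (k + 1) = pvT a k + pvStep0 a[k] := by
  unfold pvT
  rw [List.take_add_one, List.getElem?_eq_getElem h]
  simp only [Option.toList_some, List.map_append, List.sum_append, List.map_cons, List.map_nil,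
    List.sum_cons, List.sum_nil]
  ring

theorem pvS_stable (a : List Int) (k : Nat) (h : a.length ≤ k) :
    pvS a (k + 1) = pvS a k := by
  simp [pvS, List.take_of_length_le h, List.take_of_length_le (Nat.le_succ_of_le h)]

theorem pvStep1_cases (x : Int) : pvStep1 x = 1 ∨ pvStep1 x = -1 := by
  unfold pvStep1; split <;> simp

theorem pvS_le (a : List Int) (k : Nat) : pvS a k ≤ (k : Int) := by
  induction k with
  | zero => simp [pvS]
  | succ k ih =>
    by_cases h : k < a.length
    · rw [pvS_succ a k h]
      rcases pvStep1_cases a[k] with hc | hc <;> rw [hc] <;> push_cast <;> omega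
    · rw [pvS_stable a k (by omega)]; push_cast; omega

theorem pvS_zero (a : List Int) : pvS a 0 = 0 := rfl

theorem pvT_zero (a : List Int) : pvT a 0 = 0 := rfl

theorem pvAttain (a : List Int) (k : Nat) (v : Int) (h0 : 0 ≤ v) (h1 : v ≤ pvS a k) :
    ∃ j, j ≤ k ∧ pvS a j = v := by
  induction k with
  | zero => exact ⟨0, le_refl 0, by simp [pvS] at h1 ⊢; omega⟩
  | succ k ih =>
    by_cases h : k < a.length
    · rw [pvS_succ a k h] at h1
      rcases pvStep1_cases a[k] with hc | hc <;> rw [hc] at h1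
      · by_cases hv : v ≤ pvS a k
        · obtain ⟨j, hj, hs⟩ := ih hv
          exact ⟨j, by omega, hs⟩
        · refine ⟨k + 1, le_refl _, ?_⟩
          rw [pvS_succ a k h, hc]; omega
      · obtain ⟨j, hj, hs⟩ := ih (by omega)
        exact ⟨j, by omega, hs⟩
    · rw [pvS_stable a k (by omega)] at h1
      obtain ⟨j, hj, hs⟩ := ih h1
      exact ⟨j, by omega, hs⟩

theorem pvFindRange_some (p : Nat → Bool) (n j : Nat) :
    (List.range n).find? p = some j ↔ j < n ∧ p j = true ∧ ∀ i, i < j → p i = false := by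
  induction n generalizing j with
  | zero =>
    simp only [List.range_zero, List.find?_nil]
    constructor
    · intro h; cases h
    · rintro ⟨h, -, -⟩; omega
  | succ n ih =>
    rw [List.range_succ, List.find?_append]
    cases hf : (List.range n).find? p with
    | some j0 =>
      obtain ⟨hj0n, hpj0, hmin0⟩ := (ih j0).mp hf
      simp only [Option.some_or]
      constructor
      · rintro h
        injection h with h; subst h
        exact ⟨by omega, hpj0, hmin0⟩
      · rintro ⟨hjn, hpj, hmin⟩
        rcases Nat.lt_trichotomy j j0 with h | h | h
        · exact absurd hpj (by rw [hmin0 j h]; simp)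
        · rw [h]
        · exact absurd hpj0 (by rw [hmin j0 h]; simp)
    | none =>
      have hnone : ∀ i, i < n → p i = false := by
        intro i hi
        have := List.find?_eq_none.mp hf i (List.mem_range.mpr hi)
        simpa using this
      simp only [Option.none_or]
      cases hpn : p n with
      | true =>
        simp only [List.find?_cons, hpn]
        constructor
        · rintro h; injection h with h; subst h
          exact ⟨by omega, hpn, hnone⟩
        · rintro ⟨hjn, hpj, hmin⟩
          have : j = n := by
            by_contra hne
            have hjn' : j < n := by omega
            exact absurd hpj (by rw [hnone j hjn']; simp)
          rw [this]
      | false =>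
        simp only [List.find?_cons, hpn, List.find?_nil]
        constructor
        · rintro h; exact absurd h (by simp)
        · rintro ⟨hjn, hpj, hmin⟩
          by_cases hje : j = n
          · rw [hje] at hpj; rw [hpn] at hpj; exact absurd hpj (by simp)
          · have : j < n := by omega
            exact absurd hpj (by rw [hnone j this]; simp)

theorem pvFindRevRange_some (p : Nat → Bool) (n j : Nat) :
    ((List.range n).reverse).find? p = some j ↔
      j < n ∧ p j = true ∧ ∀ i, i < n → j < i → p i = false := by
  induction n generalizing j with
  | zero =>
    simp only [List.range_zero, List.reverse_nil, List.find?_nil]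
    constructor
    · intro h; cases h
    · rintro ⟨h, -, -⟩; omega
  | succ n ih =>
    rw [List.range_succ, List.reverse_append]
    simp only [List.reverse_cons, List.reverse_nil, List.nil_append, List.singleton_append,
      List.find?_cons]
    cases hpn : p n with
    | true =>
      constructor
      · rintro h; injection h with h; subst h
        exact ⟨by omega, hpn, by intro i h1 h2; omega⟩
      · rintro ⟨hjn, hpj, hmin⟩
        have : j = n := by
          by_contra hne
          have hlt : j < n := by omega
          exact absurd hpn (by rw [hmin n (by omega) hlt]; simp)
        rw [this]
    | false =>
      rw [ih j]
      constructor
      · rintro ⟨hjn, hpj, hmin⟩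
        refine ⟨by omega, hpj, ?_⟩
        intro i h1 h2
        by_cases hie : i = n
        · rw [hie]; exact hpn
        · exact hmin i (by omega) h2
      · rintro ⟨hjn, hpj, hmin⟩
        have hjn' : j ≠ n := by
          intro h; rw [h] at hpj; rw [hpn] at hpj; exact absurd hpj (by simp)
        exact ⟨by omega, hpj, fun i h1 h2 => hmin i (by omega) h2⟩

theorem pvFP_some_iff (a : List Int) (v : Int) (k j : Nat) :
    pvFP a v k = some j ↔ j ≤ k ∧ pvS a j = v ∧ ∀ j', j' < j → pvS a j' ≠ v := by
  unfold pvFP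
  rw [pvFindRange_some]
  simp only [decide_eq_true_eq, decide_eq_false_iff_not, Nat.lt_succ_iff]

theorem pvFP_none_iff (a : List Int) (v : Int) (k : Nat) :
    pvFP a v k = none ↔ ∀ j, j ≤ k → pvS a j ≠ v := by
  unfold pvFP
  rw [List.find?_eq_none]
  constructor
  · intro h j hj
    have := h j (List.mem_range.mpr (by omega))
    simpa using this
  · intro h x hx
    have hx' : x ≤ k := by have := List.mem_range.mp hx; omega
    simpa using h x hx'

theorem pvGP_some_iff (a : List Int) (w : Int) (k j : Nat) :
    pvGP a w k = some j ↔ j ≤ k ∧ pvT a j = w ∧ ∀ j', j' ≤ k → j < j' → pvT a j' ≠ w := by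
  unfold pvGP
  rw [pvFindRevRange_some]
  simp only [decide_eq_true_eq, decide_eq_false_iff_not, Nat.lt_succ_iff]

theorem pvFP_succ (a : List Int) (v : Int) (k : Nat) :
    pvFP a v (k + 1) =
      (pvFP a v k).or (if pvS a (k + 1) = v then some (k + 1) else none) := by
  unfold pvFP
  rw [List.range_succ, List.find?_append]
  congr 1
  simp only [List.find?_cons, List.find?_nil]
  by_cases h : pvS a (k + 1) = v <;> simp [h]

theorem pvFP_succ_of_ne (a : List Int) (v : Int) (k : Nat) (h : pvS a (k + 1) ≠ v) :
    pvFP a v (k + 1) = pvFP a v k := by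
  rw [pvFP_succ, if_neg h, Option.or_none]

theorem pvFP_succ_of_some (a : List Int) (v : Int) (k j : Nat) (h : pvFP a v k = some j) :
    pvFP a v (k + 1) = some j := by
  rw [pvFP_succ, h, Option.some_or]

theorem pvFP_succ_of_none (a : List Int) (v : Int) (k : Nat) (h : pvFP a v k = none) :
    pvFP a v (k + 1) = if pvS a (k + 1) = v then some (k + 1) else none := by
  rw [pvFP_succ, h, Option.none_or]

theorem pvGP_succ (a : List Int) (w : Int) (k : Nat) :
    pvGP a w (k + 1) = if pvT a (k + 1) = w then some (k + 1) else pvGP a w k := by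
  unfold pvGP
  rw [List.range_succ, List.reverse_append]
  simp only [List.reverse_cons, List.reverse_nil, List.nil_append, List.singleton_append,
    List.find?_cons]
  by_cases h : pvT a (k + 1) = w <;> simp [h]

theorem pvFP_zero (a : List Int) (v : Int) :
    pvFP a v 0 = if v = 0 then some 0 else none := by
  unfold pvFP
  simp only [List.range_succ, List.range_zero, List.nil_append, List.find?_cons, List.find?_nil]
  by_cases h : v = 0
  · rw [h]; simp [pvS]
  · have hne : pvS a 0 ≠ v := by rw [pvS_zero]; omega
    simp [hne, h]

theorem pvGP_zero (a : List Int) (w : Int) :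
    pvGP a w 0 = if w = 0 then some 0 else none := by
  unfold pvGP
  simp only [List.range_succ, List.range_zero, List.nil_append, List.reverse_cons,
    List.reverse_nil, List.find?_cons, List.find?_nil]
  by_cases h : w = 0
  · rw [h]; simp [pvT]
  · have hne : pvT a 0 ≠ w := by rw [pvT_zero]; omega
    simp [hne, h]

theorem pvPM_length (a : List Int) (k : Nat) : (pvPM a k).length = a.length + 2 := by
  simp [pvPM]

theorem pvPM_getElem (a : List Int) (k v : Nat) (h : v < a.length + 2) :
    (pvPM a k)[v]'(by rw [pvPM_length]; exact h) =
      if v = 0 then some (-1) else pvFPI a (v : Int) k := by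
  simp [pvPM]

theorem pvPM_getD (a : List Int) (k v : Nat) (h : v < a.length + 2) :
    (pvPM a k).getD v none =
      if v = 0 then some (-1) else pvFPI a (v : Int) k := by
  rw [List.getD_eq_getElem?_getD, List.getElem?_eq_getElem (by rw [pvPM_length]; exact h)]
  rw [pvPM_getElem a k v h]
  rfl

theorem pvPM_zero (a : List Int) :
    pvPM a 0 = (List.replicate (a.length + 2) (none : Option Int)).set 0 (some (-1)) := by
  apply List.ext_getElem (by simp [pvPM_length])
  intro v h1 h2
  rw [pvPM_getElem a 0 v (by rw [pvPM_length] at h1; exact h1)]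
  rw [List.getElem_set]
  by_cases hv : v = 0
  · simp [hv]
  · have hvi : ((v : Nat) : Int) ≠ 0 := by omega
    rw [if_neg hv, if_neg (fun hh => hv hh.symm)]
    simp [pvFPI, pvFP_zero, hvi, hv]

theorem pvFP_succ_eq_down (a : List Int) (v : Int) (k : Nat) (hv1 : 1 ≤ v)
    (hdown : pvS a (k + 1) = pvS a k - 1) :
    pvFP a v (k + 1) = pvFP a v k := by
  by_cases hsv : pvS a (k + 1) = v
  · obtain ⟨j, hj, hSj⟩ := pvAttain a k v (by omega) (by omega)
    cases hF : pvFP a v k with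
    | none => exact absurd hSj ((pvFP_none_iff a v k).mp hF j hj)
    | some j0 => rw [pvFP_succ_of_some a v k j0 hF]
  · exact pvFP_succ_of_ne a v k hsv

theorem pvPM_step_down (a : List Int) (k : Nat) (h : k < a.length) (hx : ¬ a[k] = 1) :
    pvPM a (k + 1) = pvPM a k := by
  unfold pvPM
  apply List.map_congr_left
  intro v hv
  by_cases hv0 : v = 0
  · simp [hv0]
  · have hdown : pvS a (k + 1) = pvS a k - 1 := by
      rw [pvS_succ a k h]; simp only [pvStep1, if_neg hx]; ring
    unfold pvFPI
    rw [pvFP_succ_eq_down a (v : Int) k (by omega) hdown]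

theorem pvState_step (a : List Int) (k : Nat) (h : k < a.length) :
    (if a[k] = 1 then
       (if 0 ≤ pvS a k + 1 ∧ (pvPM a k).getD (pvS a k + 1).toNat none = none
        then ((pvPM a k).set (pvS a k + 1).toNat (some (k : Int)), pvS a k + 1)
        else (pvPM a k, pvS a k + 1))
     else (pvPM a k, pvS a k - 1)) = (pvPM a (k + 1), pvS a (k + 1)) := by
  by_cases hx : a[k] = 1
  · have hS : pvS a (k + 1) = pvS a k + 1 := by
      rw [pvS_succ a k h]; simp only [pvStep1, if_pos hx]
    rw [if_pos hx]
    have hbound : pvS a k + 1 ≤ (k : Int) + 1 := by have := pvS_le a k; omega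
    by_cases hc : 0 ≤ pvS a k + 1 ∧ (pvPM a k).getD (pvS a k + 1).toNat none = none
    · obtain ⟨h0, hnone⟩ := hc
      rw [if_pos ⟨h0, hnone⟩]
      have hvlt : (pvS a k + 1).toNat < a.length + 2 := by omega
      have hcast : (((pvS a k + 1).toNat : Nat) : Int) = pvS a k + 1 := Int.toNat_of_nonneg h0
      rw [pvPM_getD a k (pvS a k + 1).toNat hvlt] at hnone
      have hv0 : (pvS a k + 1).toNat ≠ 0 := by
        intro hz
        rw [if_pos hz] at hnone
        exact absurd hnone (by simp)
      rw [if_neg hv0] at hnone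
      have hFnone : pvFP a ((pvS a k + 1).toNat : Int) k = none := by
        cases hF : pvFP a ((pvS a k + 1).toNat : Int) k with
        | none => rfl
        | some j =>
          unfold pvFPI at hnone
          rw [hF] at hnone
          exact absurd hnone (by simp)
      refine Prod.ext ?_ (by simp [hS])
      show (pvPM a k).set (pvS a k + 1).toNat (some (k : Int)) = pvPM a (k + 1)
      apply List.ext_getElem (by simp [pvPM_length])
      intro v h1 h2
      rw [List.getElem_set]
      have hvr : v < a.length + 2 := by simpa [pvPM_length] using h2
      rw [pvPM_getElem a (k + 1) v hvr]
      by_cases hveq : (pvS a k + 1).toNat = v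
      · rw [if_pos hveq]
        subst hveq
        rw [if_neg hv0]
        have hFnew : pvFP a ((pvS a k + 1).toNat : Int) (k + 1) = some (k + 1) := by
          rw [pvFP_succ_of_none a _ k hFnone, if_pos (by rw [hS, hcast])]
        unfold pvFPI
        rw [hFnew]
        simp only [Option.map_some]
        congr 1
        push_cast
        ring
      · rw [if_neg hveq]
        rw [pvPM_getElem a k v hvr]
        by_cases hv0' : v = 0
        · simp [hv0']
        · rw [if_neg hv0', if_neg hv0']
          have hne : pvS a (k + 1) ≠ (v : Int) := by
            rw [hS]
            intro hcc
            apply hveq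
            omega
          unfold pvFPI
          rw [pvFP_succ_of_ne a (v : Int) k hne]
    · rw [if_neg hc]
      refine Prod.ext ?_ (by simp [hS])
      show pvPM a k = pvPM a (k + 1)
      unfold pvPM
      apply List.map_congr_left
      intro v hv
      by_cases hv0 : v = 0
      · simp [hv0]
      · suffices hs : pvFP a (v : Int) (k + 1) = pvFP a (v : Int) k by
          unfold pvFPI; rw [hs]
        by_cases hsv : pvS a (k + 1) = (v : Int)
        · push_neg at hc
          have h0 : (0 : Int) ≤ pvS a k + 1 := by rw [← hS, hsv]; omega
          have hnone := hc h0
          have htn : (pvS a k + 1).toNat = v := by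
            rw [← hS]
            omega
          rw [htn] at hnone
          rw [pvPM_getD a k v (by omega)] at hnone
          rw [if_neg hv0] at hnone
          unfold pvFPI at hnone
          cases hF : pvFP a (v : Int) k with
          | none => rw [hF] at hnone; exact absurd rfl hnone
          | some j0 => exact pvFP_succ_of_some a (v : Int) k j0 hF
        · exact pvFP_succ_of_ne a (v : Int) k hsv
  · rw [if_neg hx]
    have hS : pvS a (k + 1) = pvS a k - 1 := by
      rw [pvS_succ a k h]; simp only [pvStep1, if_neg hx]; ring
    rw [pvPM_step_down a k h hx]
    exact Prod.ext rfl (by simp [hS])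

theorem pvR_eq (a : List Int) (k : Nat) (h : k < a.length) :
    (if pvS a (k + 1) < 0 then (k : Int) + 1
     else
       match (pvPM a (k + 1)).getD (pvS a (k + 1) + 1).toNat none with
       | some p => (k : Int) - p
       | none => 0) = pvLsp a k := by
  unfold pvLsp
  by_cases hs : pvS a (k + 1) < 0
  · simp [hs]
  · rw [if_neg hs]
    simp only [if_neg hs]
    have h0 : 0 ≤ pvS a (k + 1) := by omega
    have hb : pvS a (k + 1) ≤ (k : Int) + 1 := by
      have := pvS_le a (k + 1); push_cast at this; omega
    have hvlt : (pvS a (k + 1) + 1).toNat < a.length + 2 := by omega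
    have hv0 : (pvS a (k + 1) + 1).toNat ≠ 0 := by omega
    have hcast : (((pvS a (k + 1) + 1).toNat : Nat) : Int) = pvS a (k + 1) + 1 := by omega
    rw [pvPM_getD a (k + 1) _ hvlt, if_neg hv0]
    unfold pvFPI
    rw [hcast]
    cases hF : pvFP a (pvS a (k + 1) + 1) (k + 1) with
    | none => simp
    | some j => simp

theorem leaderLoop_inv (a : List Int) :
    ∀ (rest : List Int) (k : Nat) (acc : List Int),
      rest = a.drop k →
      leaderLoop rest (k : Int) (pvPM a k) (pvS a k) acc
        = acc ++ (List.range' k (a.length - k)).map (pvLsp a) := by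
  intro rest
  induction rest with
  | nil =>
    intro k acc hrest
    have hk : a.length ≤ k := by
      by_contra hh
      push_neg at hh
      have := List.drop_eq_nil_iff.mp hrest.symm
      omega
    have hz : a.length - k = 0 := by omega
    rw [hz]
    simp [leaderLoop]
  | cons x xs ih =>
    intro k acc hrest
    have hk : k < a.length := by
      by_contra hh
      push_neg at hh
      rw [List.drop_eq_nil_of_le hh] at hrest
      exact absurd hrest (by simp)
    have hdk := List.drop_eq_getElem_cons hk
    rw [hdk] at hrest
    injection hrest with hx hxs
    subst hx
    simp only [leaderLoop]
    have hst := pvState_step a k hk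
    simp only [hst]
    have hr := pvR_eq a k hk
    simp only [hr]
    have hcast : (k : Int) + 1 = ((k + 1 : Nat) : Int) := by push_cast; ring
    rw [hcast, ih (k + 1) (acc ++ [pvLsp a k]) hxs]
    have hlen : a.length - k = (a.length - (k + 1)) + 1 := by omega
    rw [hlen, List.range'_succ, List.map_cons, List.append_assoc, List.singleton_append]

theorem leader0Size_eq (a : List Int) :
    leader0Size a = (List.range a.length).map (pvLsp a) := by
  unfold leader0Size
  rw [← pvPM_zero a]
  have h := leaderLoop_inv a a 0 [] (by simp)
  simp only [Nat.cast_zero, Nat.sub_zero] at h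
  rw [show pvS a 0 = 0 from rfl] at h
  rw [h]
  simp [List.range_eq_range']

theorem pvStep1_comp (x : Int) : pvStep1 (1 - x) = pvStep0 x := by
  unfold pvStep1 pvStep0
  by_cases h : x = 0
  · rw [if_pos h, if_pos (by omega)]
  · rw [if_neg h, if_neg (by omega)]

theorem pvT_len (a : List Int) : pvT a a.length = (a.map pvStep0).sum := by
  unfold pvT
  rw [List.take_of_length_le (le_refl a.length)]

theorem pvT_split (a : List Int) (m : Nat) (hm : m ≤ a.length) :
    ((a.drop m).map pvStep0).sum = pvT a a.length - pvT a m := by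
  have h2 : (a.map pvStep0).sum
      = ((a.take m).map pvStep0).sum + ((a.drop m).map pvStep0).sum := by
    conv_lhs => rw [← List.take_append_drop m a, List.map_append, List.sum_append]
  rw [pvT_len]
  unfold pvT
  omega

theorem pvS_c (a : List Int) (m : Nat) (hm : m ≤ a.length) :
    pvS (a.reverse.map (fun x => 1 - x)) m = pvT a a.length - pvT a (a.length - m) := by
  unfold pvS
  rw [← List.map_take, List.take_reverse]
  rw [List.map_reverse, List.map_reverse, List.sum_reverse]
  rw [List.map_map]
  have hfun : (pvStep1 ∘ fun x => 1 - x) = pvStep0 := funext pvStep1_comp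
  rw [hfun]
  exact pvT_split a (a.length - m) (by omega)

theorem pvLen_c (a : List Int) : (a.reverse.map (fun x => 1 - x)).length = a.length := by
  simp

theorem sizeL_eq (a : List Int) (i : Nat) (hi : i + 1 ≤ a.length) :
    (if pvS a (i + 1) < 0 then (i : Int) + 1
     else
       if (pvFPI a (pvS a (i + 1) + 1) a.length).getD (i : Int) < (i : Int)
       then (i : Int) - (pvFPI a (pvS a (i + 1) + 1) a.length).getD (i : Int)
       else 0)
    = pvLsp a i := by
  unfold pvLsp
  by_cases hs : pvS a (i + 1) < 0
  · simp [hs]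
  · rw [if_neg hs]
    simp only [if_neg hs]
    unfold pvFPI
    cases hF : pvFP a (pvS a (i + 1) + 1) (i + 1) with
    | some j =>
      obtain ⟨hj1, hj2, hj3⟩ := (pvFP_some_iff a _ (i + 1) j).mp hF
      have hglob : pvFP a (pvS a (i + 1) + 1) a.length = some j := by
        rw [pvFP_some_iff]
        exact ⟨by omega, hj2, hj3⟩
      rw [hglob]
      have hji : j ≠ i + 1 := by
        intro hh
        rw [hh] at hj2
        omega
      simp only [Option.map_some, Option.getD_some]
      rw [if_pos (by omega)]
    | none =>
      have hnone := (pvFP_none_iff a _ (i + 1)).mp hF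
      cases hG : pvFP a (pvS a (i + 1) + 1) a.length with
      | none => simp
      | some j =>
        obtain ⟨hj1, hj2, hj3⟩ := (pvFP_some_iff a _ a.length j).mp hG
        have hjgt : i + 1 < j := by
          by_contra hh
          push_neg at hh
          exact hnone j hh hj2
        simp only [Option.map_some, Option.getD_some]
        rw [if_neg (by omega)]

theorem sizeR_eq (a : List Int) (j : Nat) (h1 : 1 ≤ j) (h2 : j < a.length) :
    pvLsp (a.reverse.map (fun x => 1 - x)) (a.length - 1 - j) =
      (if pvT a a.length < pvT a j then (a.length : Int) - ((j : Nat) : Int)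
       else
         if (pvGPI a (pvT a j - 1) a.length).getD ((j : Nat) : Int) > ((j : Nat) : Int)
         then (pvGPI a (pvT a j - 1) a.length).getD ((j : Nat) : Int) - ((j : Nat) : Int)
         else 0) := by
  set c := a.reverse.map (fun x => 1 - x) with hcdef
  have hm1 : a.length - 1 - j + 1 = a.length - j := by omega
  have hSc : pvS c (a.length - j) = pvT a a.length - pvT a j := by
    rw [hcdef, pvS_c a (a.length - j) (by omega),
      show a.length - (a.length - j) = j from by omega]
  unfold pvLsp
  simp only [hm1, hSc]
  by_cases hneg : pvT a a.length - pvT a j < 0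
  · rw [if_pos hneg, if_pos (by omega)]
    omega
  · rw [if_neg hneg, if_neg (by omega)]
    cases hF : pvFP c (pvT a a.length - pvT a j + 1) (a.length - j) with
    | some m' =>
      obtain ⟨hm'1, hm'2, hm'3⟩ := (pvFP_some_iff c _ (a.length - j) m').mp hF
      have hm'0 : 1 ≤ m' := by
        rcases Nat.eq_zero_or_pos m' with hz | hp
        · rw [hz, pvS_zero] at hm'2
          omega
        · exact hp
      have hTk0 : pvT a (a.length - m') = pvT a j - 1 := by
        have hh := pvS_c a m' (by omega)
        rw [← hcdef] at hh
        rw [hh] at hm'2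
        omega
      have hGP : pvGP a (pvT a j - 1) a.length = some (a.length - m') := by
        rw [pvGP_some_iff]
        refine ⟨by omega, hTk0, ?_⟩
        intro k' hk' hgt hTk'
        have hm'' : a.length - k' < m' := by omega
        apply hm'3 (a.length - k') hm''
        have hh := pvS_c a (a.length - k') (by omega)
        rw [← hcdef] at hh
        rw [hh, show a.length - (a.length - k') = k' from by omega, hTk']
        ring
      unfold pvGPI
      rw [hGP]
      simp only [Option.map_some, Option.getD_some]
      have hk0j : j < a.length - m' := by
        rcases Nat.lt_or_ge j (a.length - m') with hlt | hge2
        · exact hlt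
        · have heq : a.length - m' = j := by omega
          rw [heq] at hTk0
          omega
      rw [if_pos (by omega)]
      omega
    | none =>
      have hnone := (pvFP_none_iff c _ (a.length - j)).mp hF
      have hnoocc : ∀ k', j ≤ k' → k' ≤ a.length → pvT a k' ≠ pvT a j - 1 := by
        intro k' hk1 hk2 hTk'
        have hm' : a.length - k' ≤ a.length - j := by omega
        apply hnone (a.length - k') hm'
        have hh := pvS_c a (a.length - k') (by omega)
        rw [← hcdef] at hh
        rw [hh, show a.length - (a.length - k') = k' from by omega, hTk']
        ring
      unfold pvGPI
      cases hG : pvGP a (pvT a j - 1) a.length with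
      | none => simp
      | some kg =>
        obtain ⟨hkg1, hkg2, hkg3⟩ := (pvGP_some_iff a _ a.length kg).mp hG
        have hkgj : kg < j := by
          by_contra hh
          push_neg at hh
          exact hnoocc kg hh hkg1 hkg2
        simp only [Option.map_some, Option.getD_some]
        rw [if_neg (by omega)]

theorem altScan_inv (a : List Int) :
    ∀ (rest : List Int) (k : Nat) (svals t : List Int) (fd ld : PySem.Dict Int Int),
      rest = a.drop k → k ≤ a.length →
      (∀ v, fd.get? v = pvFPI a v k) →
      (∀ w, ld.get? w = pvGPI a w k) →
      ((altScan rest (k : Int) (pvS a k) fd svals (pvT a k) t ld).1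
          = svals ++ (List.range' k (a.length - k)).map (fun i => pvS a (i + 1)) ∧
       (∀ v, (altScan rest (k : Int) (pvS a k) fd svals (pvT a k) t ld).2.1.get? v
          = pvFPI a v a.length) ∧
       (altScan rest (k : Int) (pvS a k) fd svals (pvT a k) t ld).2.2.1
          = t ++ (List.range' k (a.length - k)).map (fun m => pvT a (m + 1)) ∧
       (∀ w, (altScan rest (k : Int) (pvS a k) fd svals (pvT a k) t ld).2.2.2.get? w
          = pvGPI a w a.length)) := by
  intro rest
  induction rest with
  | nil =>
    intro k svals t fd ld hrest hk hfd hld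
    have hkk : k = a.length := by
      have := List.drop_eq_nil_iff.mp hrest.symm
      omega
    subst hkk
    rw [Nat.sub_self]
    refine ⟨?_, hfd, ?_, hld⟩
    · show svals = svals ++ (List.range' a.length 0).map _
      simp
    · show t = t ++ (List.range' a.length 0).map _
      simp
  | cons x xs ih =>
    intro k svals t fd ld hrest hk hfd hld
    have hklt : k < a.length := by
      by_contra hh
      push_neg at hh
      rw [List.drop_eq_nil_of_le hh] at hrest
      exact absurd hrest (by simp)
    have hdk := List.drop_eq_getElem_cons hklt
    rw [hdk] at hrest
    injection hrest with hx hxs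
    subst hx
    simp only [altScan]
    have hS' : (pvS a k + if a[k] = 1 then 1 else -1) = pvS a (k + 1) := by
      rw [pvS_succ a k hklt]; rfl
    have hT' : (pvT a k + if a[k] = 0 then 1 else -1) = pvT a (k + 1) := by
      rw [pvT_succ a k hklt]; rfl
    rw [hS', hT']
    have hfd' : ∀ v, (if fd.contains (pvS a (k + 1)) = true then fd
        else fd.insert (pvS a (k + 1)) (k : Int)).get? v = pvFPI a v (k + 1) := by
      intro v
      by_cases hc : fd.contains (pvS a (k + 1)) = true
      · rw [if_pos hc]
        have hsome : (fd.get? (pvS a (k + 1))).isSome := by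
          rw [PySem.Dict.contains_eq_isSome_get?] at hc
          exact hc
        rw [hfd (pvS a (k + 1))] at hsome
        unfold pvFPI at hsome
        cases hFk : pvFP a (pvS a (k + 1)) k with
        | none => rw [hFk] at hsome; exact absurd hsome (by simp)
        | some j0 =>
          by_cases hv : v = pvS a (k + 1)
          · rw [hv, hfd (pvS a (k + 1))]
            unfold pvFPI
            rw [hFk, pvFP_succ_of_some a (pvS a (k + 1)) k j0 hFk]
          · rw [hfd v]
            unfold pvFPI
            rw [pvFP_succ_of_ne a v k (fun hh => hv hh.symm)]
      · rw [if_neg hc]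
        have hnone : fd.get? (pvS a (k + 1)) = none := by
          cases hgg : fd.get? (pvS a (k + 1)) with
          | none => rfl
          | some y =>
            exfalso
            apply hc
            rw [PySem.Dict.contains_eq_isSome_get?, hgg]
            rfl
        rw [hfd (pvS a (k + 1))] at hnone
        unfold pvFPI at hnone
        have hFk : pvFP a (pvS a (k + 1)) k = none := by
          cases hFk : pvFP a (pvS a (k + 1)) k with
          | none => rfl
          | some j0 => rw [hFk] at hnone; exact absurd hnone (by simp)
        rw [PySem.Dict.get?_insert]
        by_cases hv : v = pvS a (k + 1)
        · rw [hv, if_pos rfl]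
          unfold pvFPI
          rw [pvFP_succ_of_none a (pvS a (k + 1)) k hFk, if_pos rfl]
          simp only [Option.map_some]
          congr 1
          push_cast
          ring
        · rw [if_neg hv, hfd v]
          unfold pvFPI
          rw [pvFP_succ_of_ne a v k (fun hh => hv hh.symm)]
    have hld' : ∀ w, (ld.insert (pvT a (k + 1)) (((k + 1 : Nat)) : Int)).get? w
        = pvGPI a w (k + 1) := by
      intro w
      rw [PySem.Dict.get?_insert]
      unfold pvGPI
      rw [pvGP_succ]
      by_cases hw : w = pvT a (k + 1)
      · subst hw
        rw [if_pos rfl, if_pos rfl]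
        simp
      · rw [if_neg hw, if_neg (fun hh => hw hh.symm), hld w]
        rfl
    have hcast : (k : Int) + 1 = ((k + 1 : Nat) : Int) := by push_cast; ring
    rw [hcast]
    obtain ⟨c1, c2, c3, c4⟩ := ih (k + 1) (svals ++ [pvS a (k + 1)]) (t ++ [pvT a (k + 1)])
      (if fd.contains (pvS a (k + 1)) = true then fd
        else fd.insert (pvS a (k + 1)) (k : Int))
      (ld.insert (pvT a (k + 1)) (((k + 1 : Nat)) : Int))
      hxs (by omega) hfd' hld'
    refine ⟨?_, c2, ?_, c4⟩
    · rw [c1]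
      have hlen : a.length - k = (a.length - (k + 1)) + 1 := by omega
      rw [hlen, List.range'_succ, List.map_cons, List.append_assoc, List.singleton_append]
    · rw [c3]
      have hlen : a.length - k = (a.length - (k + 1)) + 1 := by omega
      rw [hlen, List.range'_succ, List.map_cons, List.append_assoc, List.singleton_append]

theorem pvMapRangeGetD (f : Nat → Int) (n i : Nat) (h : i < n) :
    ((List.range n).map f).getD i 0 = f i := by
  rw [List.getD_eq_getElem?_getD, List.getElem?_eq_getElem (by simpa using h)]
  simp

theorem pvRevMapRangeGetD (f : Nat → Int) (n i : Nat) (h : i < n) :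
    (((List.range n).map f).reverse).getD i 0 = f (n - 1 - i) := by
  rw [List.getD_eq_getElem?_getD, List.getElem?_eq_getElem (by simpa using h)]
  rw [List.getElem_reverse]
  simp

theorem solution_eq_fold (A : List Int) :
    solution A = (List.range (A.length - 1)).foldl
      (fun result i =>
        let sizeL := pvLsp A i
        let sizeR := pvLsp (A.reverse.map (fun x => 1 - x)) (A.length - 1 - (i + 1))
        if sizeL > 0 ∧ sizeR > 0 then max result (sizeL + sizeR) else result) 0 := by
  unfold solution
  simp only [leader0Size_eq]
  apply PySem.List.foldl_congr_mem
  intro acc i hi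
  have hilt : i < A.length - 1 := List.mem_range.mp hi
  have h1 : ((List.range A.length).map (pvLsp A)).getD i 0 = pvLsp A i :=
    pvMapRangeGetD (pvLsp A) A.length i (by omega)
  have h2 : (((List.range (A.reverse.map (fun x => 1 - x)).length).map
        (pvLsp (A.reverse.map (fun x => 1 - x)))).reverse).getD (i + 1) 0
      = pvLsp (A.reverse.map (fun x => 1 - x)) (A.length - 1 - (i + 1)) := by
    rw [pvLen_c]
    exact pvRevMapRangeGetD _ A.length (i + 1) (by omega)
  rw [h1, h2]

theorem solution_alt_eq_fold (A : List Int) :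
    solution_alt A = (List.range (A.length - 1)).foldl
      (fun result i =>
        let sizeL := pvLsp A i
        let sizeR := pvLsp (A.reverse.map (fun x => 1 - x)) (A.length - 1 - (i + 1))
        if sizeL > 0 ∧ sizeR > 0 then max result (sizeL + sizeR) else result) 0 := by
  have hfd0 : ∀ v, (PySem.Dict.ofList [((0 : Int), (-1 : Int))]).get? v = pvFPI A v 0 := by
    intro v
    have hof : (PySem.Dict.ofList [((0 : Int), (-1 : Int))]).get? v
        = ((PySem.Dict.empty : PySem.Dict Int Int).insert 0 (-1)).get? v := rfl
    rw [hof, PySem.Dict.get?_insert]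
    unfold pvFPI
    rw [pvFP_zero]
    by_cases hv : v = 0
    · rw [if_pos hv, if_pos hv]
      simp
    · rw [if_neg hv, if_neg hv, PySem.Dict.get?_empty]
      rfl
  have hld0 : ∀ w, (PySem.Dict.ofList [((0 : Int), (0 : Int))]).get? w = pvGPI A w 0 := by
    intro w
    have hof : (PySem.Dict.ofList [((0 : Int), (0 : Int))]).get? w
        = ((PySem.Dict.empty : PySem.Dict Int Int).insert 0 0).get? w := rfl
    rw [hof, PySem.Dict.get?_insert]
    unfold pvGPI
    rw [pvGP_zero]
    by_cases hw : w = 0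
    · rw [if_pos hw, if_pos hw]
      simp
    · rw [if_neg hw, if_neg hw, PySem.Dict.get?_empty]
      rfl
  have hscan := altScan_inv A A 0 [] [(0 : Int)]
    (PySem.Dict.ofList [((0 : Int), (-1 : Int))]) (PySem.Dict.ofList [((0 : Int), (0 : Int))])
    (by simp) (by omega) hfd0 hld0
  rw [show ((0 : Nat) : Int) = (0 : Int) from rfl, show pvS A 0 = 0 from rfl,
    show pvT A 0 = 0 from rfl] at hscan
  simp only [Nat.sub_zero, List.nil_append, ← List.range_eq_range'] at hscan
  obtain ⟨c1, c2, c3, c4⟩ := hscan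
  have htL : (altScan A 0 0 (PySem.Dict.ofList [((0 : Int), (-1 : Int))]) [] 0 [(0 : Int)]
      (PySem.Dict.ofList [((0 : Int), (0 : Int))])).2.2.1
      = (List.range (A.length + 1)).map (pvT A) := by
    rw [c3]
    apply List.ext_getElem (by simp)
    intro m hm1 hm2
    simp only [List.length_cons, List.length_map, List.length_range, List.length_nil] at hm1 hm2
    rcases Nat.eq_zero_or_pos m with hz | hp
    · subst hz
      simp [pvT_zero]
    · have h1le : ([(0 : Int)]).length ≤ m := by simp; omega
      rw [List.getElem_map, List.getElem_range, List.getElem_append_right h1le]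
      simp only [List.length_cons, List.length_nil, List.getElem_map, List.getElem_range]
      congr 1
      omega
  unfold solution_alt
  apply PySem.List.foldl_congr_mem
  intro acc i hi
  have hilt : i < A.length - 1 := List.mem_range.mp hi
  dsimp only
  rw [c1, pvMapRangeGetD (fun i => pvS A (i + 1)) A.length i (by omega)]
  rw [PySem.Dict.getD_eq_get?_getD, c2]
  rw [htL, pvMapRangeGetD (pvT A) (A.length + 1) A.length (by omega),
    pvMapRangeGetD (pvT A) (A.length + 1) (i + 1) (by omega)]
  rw [PySem.Dict.getD_eq_get?_getD, c4]
  rw [sizeL_eq A i (by omega)]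
  rw [← sizeR_eq A (i + 1) (by omega) (by omega)]

-- ===== VERDICT (by name: the statement is the Claim_ definition above) =====
theorem solution_spec : Claim_equal_solution := by
  unfold Claim_equal_solution
  intro A _
  unfold Spec_solution
  rw [solution_eq_fold, solution_alt_eq_fold]
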